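-- pv_equiv track=rewrite | github.com/acjo/algorithims_optimization | UnixShell2/shell2.py | prob6
-- ===== SOURCE A (Python) =====
-- def prob6(n = 10):
--    """this problem counts to or from n three different ways, and
--       returns the resulting lists each integer
--
--    Parameters:
--        n (int): the integer to count to and down from
--    Returns:
--        integerCounter (list): list of integers from 0 to the number n
--        twoCounter (list): list of integers created by counting down from n by two
--        threeCounter (list): list of integers created by counting up to n by 3
--    """
--    #print what the program is doing
--    integerCounter = list()
--    twoCounter = list()
--    threeCounter = list()
--    counter = n
--    for i in range(n+1):
--        integerCounter.append(i)
--        if (i % 2 == 0):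
--            twoCounter.append(counter - i)
--        if (i % 3 == 0):
--            threeCounter.append(i)
--    #return relevant values
--    return integerCounter, twoCounter, threeCounter
-- ===== SOURCE B (Python) =====
-- def prob6(n=10):
--     """Same outputs as A, built from three independent stepped ranges."""
--     integerCounter = list(range(n + 1))
--     twoCounter = list(range(n, -1, -2))
--     threeCounter = list(range(0, n + 1, 3))
--     return integerCounter, twoCounter, threeCounter
-- ===== Notes on version B (the rewrite author's own statement) =====
-- stated objective: idiomatic
-- what changed: Replaces the single interleaved Python loop with modular tests and appends by three independent stepped range() constructions, one per output list, with no conditionals.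
import Mathlib
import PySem

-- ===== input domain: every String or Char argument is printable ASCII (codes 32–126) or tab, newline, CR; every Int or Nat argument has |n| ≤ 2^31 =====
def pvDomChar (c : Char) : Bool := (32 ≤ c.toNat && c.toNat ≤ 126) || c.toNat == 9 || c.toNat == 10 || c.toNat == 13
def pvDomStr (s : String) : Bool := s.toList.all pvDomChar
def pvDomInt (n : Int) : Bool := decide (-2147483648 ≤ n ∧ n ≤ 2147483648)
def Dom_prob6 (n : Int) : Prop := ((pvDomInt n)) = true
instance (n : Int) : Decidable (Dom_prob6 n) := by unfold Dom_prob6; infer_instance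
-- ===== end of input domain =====

-- ===== PORT A =====
-- B builds the three lists with independent stepped ranges instead of A's single interleaved loop; outputs proved equal.
def prob6 (n : Int) : List Int × List Int × List Int :=
  let counter := n
  (PySem.List.pyRange 0 (n + 1) 1).foldl
    (fun (st : List Int × List Int × List Int) i =>
      let ic := st.1 ++ [i]
      let tw := if PySem.Int.mod i 2 = 0 then st.2.1 ++ [counter - i] else st.2.1
      let th := if PySem.Int.mod i 3 = 0 then st.2.2 ++ [i] else st.2.2
      (ic, tw, th))
    ([], [], [])

-- ===== PORT B =====
def prob6_alt (n : Int) : List Int × List Int × List Int :=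
  (PySem.List.pyRange 0 (n + 1) 1, PySem.List.pyRange n (-1) (-2), PySem.List.pyRange 0 (n + 1) 3)

-- ===== PRECONDITION & SPEC =====
def Spec_prob6 (n : Int) (out : List Int × List Int × List Int) : Prop := out = prob6_alt n
instance (n : Int) (out : List Int × List Int × List Int) : Decidable (Spec_prob6 n out) := by unfold Spec_prob6; infer_instance

-- ===== CLAIM (what is proved, stated in full; the proofs are below) =====
def Claim_equal_prob6 : Prop := ∀ (n : Int), Dom_prob6 n → Spec_prob6 n (prob6 n)

-- ===== LEMMAS AND PROOFS =====

-- A's fold, characterised: it appends the whole list, the evens mapped through (n - ·), and the multiples of 3.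
theorem prob6_foldl_char (n : Int) (l : List Int) (a b c : List Int) :
    l.foldl
      (fun (st : List Int × List Int × List Int) i =>
        let ic := st.1 ++ [i]
        let tw := if PySem.Int.mod i 2 = 0 then st.2.1 ++ [n - i] else st.2.1
        let th := if PySem.Int.mod i 3 = 0 then st.2.2 ++ [i] else st.2.2
        (ic, tw, th))
      (a, b, c)
    = (a ++ l,
       b ++ (l.filter (fun i => decide (PySem.Int.mod i 2 = 0))).map (fun i => n - i),
       c ++ l.filter (fun i => decide (PySem.Int.mod i 3 = 0))) := by
  induction l generalizing a b c with
  | nil => simp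
  | cons x xs ih =>
    simp only [List.foldl_cons, List.filter_cons]
    rw [ih]
    by_cases h2 : (2 : Int) ∣ x <;> by_cases h3 : (3 : Int) ∣ x <;>
      simp [h2, h3]

theorem filter_even_range (M : Nat) :
    ((List.range M).map Int.ofNat).filter (fun i => decide (PySem.Int.mod i 2 = 0))
      = (List.range ((M + 1) / 2)).map (fun k => 2 * Int.ofNat k) := by
  induction M with
  | zero => simp
  | succ m ih =>
    rw [List.range_succ, List.map_append, List.filter_append, ih]
    by_cases h : m % 2 = 0
    · have hd : ((2:Int)) ∣ (m:Int) := by exact_mod_cast Nat.dvd_of_mod_eq_zero h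
      have hq : (m + 1 + 1) / 2 = (m + 1) / 2 + 1 := by omega
      rw [hq, List.range_succ, List.map_append]
      simp [hd, Int.ofNat_eq_natCast]
      omega
    · have hd : ¬ ((2:Int)) ∣ (m:Int) := by
        intro hd'
        have : (2:ℕ) ∣ m := by exact_mod_cast hd'
        omega
      have hq : (m + 1 + 1) / 2 = (m + 1) / 2 := by omega
      rw [hq]
      simp [hd, Int.ofNat_eq_natCast]
theorem filter_three_range (M : Nat) :
    ((List.range M).map Int.ofNat).filter (fun i => decide (PySem.Int.mod i 3 = 0))
      = (List.range ((M + 2) / 3)).map (fun k => 3 * Int.ofNat k) := by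
  induction M with
  | zero => simp
  | succ m ih =>
    rw [List.range_succ, List.map_append, List.filter_append, ih]
    by_cases h : m % 3 = 0
    · have hd : ((3:Int)) ∣ (m:Int) := by exact_mod_cast Nat.dvd_of_mod_eq_zero h
      have hq : (m + 1 + 2) / 3 = (m + 2) / 3 + 1 := by omega
      rw [hq, List.range_succ, List.map_append]
      simp [hd, Int.ofNat_eq_natCast]
      omega
    · have hd : ¬ ((3:Int)) ∣ (m:Int) := by
        intro hd'
        have : (3:ℕ) ∣ m := by exact_mod_cast hd'
        omega
      have hq : (m + 1 + 2) / 3 = (m + 2) / 3 := by omega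
      rw [hq]
      simp [hd, Int.ofNat_eq_natCast]

theorem pyRange_up_one (m : Nat) :
    PySem.List.pyRange 0 ((m : Int) + 1) 1 = (List.range (m + 1)).map Int.ofNat := by
  rw [PySem.List.pyRange_one]
  have : (((m : Int) + 1) - 0).toNat = m + 1 := by omega
  rw [this]
  refine List.map_congr_left ?_
  intro k _
  simp [Int.ofNat_eq_natCast]

theorem pyRange_down_two (m : Nat) :
    PySem.List.pyRange (m : Int) (-1) (-2) = (List.range ((m + 2) / 2)).map (fun k => (m : Int) - 2 * Int.ofNat k) := by
  have hlt : (-1 : Int) < (m : Int) := by omega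
  have hc : (((m : Int) - (-1) + -(-2) - 1) / -(-2)).toNat = (m + 2) / 2 := by norm_num; omega
  simp only [PySem.List.pyRange, if_neg (by norm_num : ¬ (-2 : Int) = 0),
    if_neg (by norm_num : ¬ (0 : Int) < -2), if_pos hlt, hc]
  refine List.map_congr_left ?_
  intro k _
  simp [Int.ofNat_eq_natCast]
  ring

theorem pyRange_up_three (m : Nat) :
    PySem.List.pyRange 0 ((m : Int) + 1) 3 = (List.range ((m + 3) / 3)).map (fun k => 3 * Int.ofNat k) := by
  have hlt : (0 : Int) < (m : Int) + 1 := by omega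
  have hc : ((((m : Int) + 1) - 0 + 3 - 1) / 3).toNat = (m + 3) / 3 := by norm_num; omega
  simp only [PySem.List.pyRange, if_neg (by norm_num : ¬ (3 : Int) = 0),
    if_pos (by norm_num : (0 : Int) < 3), if_pos hlt, hc]
  refine List.map_congr_left ?_
  intro k _
  simp [Int.ofNat_eq_natCast]

theorem prob6_eq_nonneg (m : Nat) : prob6 (m : Int) = prob6_alt (m : Int) := by
  show ((PySem.List.pyRange 0 ((m : Int) + 1) 1).foldl
      (fun (st : List Int × List Int × List Int) i =>
        let ic := st.1 ++ [i]
        let tw := if PySem.Int.mod i 2 = 0 then st.2.1 ++ [(m : Int) - i] else st.2.1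
        let th := if PySem.Int.mod i 3 = 0 then st.2.2 ++ [i] else st.2.2
        (ic, tw, th))
      ([], [], [])) = prob6_alt (m : Int)
  rw [prob6_foldl_char, pyRange_up_one, filter_even_range, filter_three_range]
  have e2 : (m + 1 + 1) / 2 = (m + 2) / 2 := by omega
  have e3 : (m + 1 + 2) / 3 = (m + 3) / 3 := by omega
  rw [e2, e3]
  unfold prob6_alt
  rw [pyRange_up_one, pyRange_down_two, pyRange_up_three]
  simp [List.map_map, Function.comp]

-- ===== VERDICT (by name: the statement is the Claim_ definition above) =====
theorem prob6_spec : Claim_equal_prob6 := by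
  unfold Claim_equal_prob6 Spec_prob6
  intro n _
  by_cases hn : 0 ≤ n
  · obtain ⟨m, rfl⟩ := Int.eq_ofNat_of_zero_le hn
    exact prob6_eq_nonneg m
  · have h2 : ¬ (-1 : Int) < n := by omega
    have h3 : ¬ (0 : Int) < n + 1 := by omega
    simp [prob6, prob6_alt, PySem.List.pyRange, h2, h3]
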